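-- pv_equiv track=rewrite | github.com/jemtca/CodingBat | Python/List-3/can_balance.py | can_balance
-- ===== SOURCE A (Python) =====
-- def can_balance(nums):
--     b = False
--     found = False
--     first_side = 0
--     second_side = 0
--
--     i = 0
--     while i < len(nums) and not found:
--         first_side = first_side + nums[i]
--         j = i + 1
--         while j < len(nums):
--             second_side = second_side + nums[j]
--             j += 1
--         if first_side == second_side:
--             found = True
--             b = True
--         second_side = 0
--         i += 1
--
--     return b
-- ===== SOURCE B (Python) =====
-- def can_balance(nums):
--     total = sum(nums)
--     prefix = 0
--     for x in nums:
--         prefix += x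
--         if 2 * prefix == total:
--             return True
--     return False
-- ===== Notes on version B (the rewrite author's own statement) =====
-- stated objective: faster
-- what changed: Replaces the nested loop (re-summing the suffix for every split point) by one pass that keeps a running prefix sum and compares it against total-minus-prefix (2*prefix == total), with early return.
import Mathlib
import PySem

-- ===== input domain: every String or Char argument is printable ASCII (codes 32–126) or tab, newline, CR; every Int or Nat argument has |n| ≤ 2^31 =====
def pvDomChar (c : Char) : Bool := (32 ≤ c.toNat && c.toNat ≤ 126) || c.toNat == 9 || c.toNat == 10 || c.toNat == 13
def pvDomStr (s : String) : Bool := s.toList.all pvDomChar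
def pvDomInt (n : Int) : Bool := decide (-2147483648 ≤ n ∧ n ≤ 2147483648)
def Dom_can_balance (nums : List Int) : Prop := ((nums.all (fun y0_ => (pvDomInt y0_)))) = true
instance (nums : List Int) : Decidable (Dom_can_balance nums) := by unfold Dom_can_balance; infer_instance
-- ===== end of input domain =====

-- B replaces A's nested loop (re-summing the suffix at every split) by a single pass
-- comparing 2 * prefix-sum with the total sum; objective: faster (O(n^2) → O(n)).

-- ===== PORT A =====
-- outer while of A: state (b, found, first_side); the inner while is the fold over range(i+1, len)
def canLoopA (nums : List Int) (i : Nat) (b found : Bool) (first : Int) : Bool :=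
  if _h : i < nums.length ∧ found = false then
    let first' := first + PySem.List.pyGetD nums (i : Int) 0
    let second : Int :=
      (PySem.List.pyRange ((i : Int) + 1) (nums.length : Int) 1).foldl
        (fun acc j => acc + PySem.List.pyGetD nums j 0) 0
    if first' = second then canLoopA nums (i + 1) true true first'
    else canLoopA nums (i + 1) b found first'
  else b
termination_by nums.length - i
decreasing_by all_goals omega

def can_balance (nums : List Int) : Bool := canLoopA nums 0 false false 0

-- ===== PORT B =====
def loopB : List Int → Int → Int → Bool
  | [], _, _ => false
  | x :: rest, pre, total =>
    if 2 * (pre + x) = total then true else loopB rest (pre + x) total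

def can_balance_alt (nums : List Int) : Bool := loopB nums 0 nums.sum

-- ===== PRECONDITION & SPEC =====
def Spec_can_balance (nums : List Int) (out : Bool) : Prop := out = can_balance_alt nums
instance (nums : List Int) (out : Bool) : Decidable (Spec_can_balance nums out) := by unfold Spec_can_balance; infer_instance

-- ===== CLAIM (what is proved, stated in full; the proofs are below) =====
def Claim_equal_can_balance : Prop := ∀ (nums : List Int), Dom_can_balance nums → Spec_can_balance nums (can_balance nums)

-- ===== LEMMAS AND PROOFS =====

theorem canLoopA_found (nums : List Int) (i : Nat) (first : Int) :
    canLoopA nums i true true first = true := by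
  unfold canLoopA
  simp

theorem canLoopA_eq_loopB (rest nums : List Int) (i : Nat) (first : Int)
    (hdrop : nums.drop i = rest) :
    canLoopA nums i false false first = loopB rest first (first + rest.sum) := by
  induction rest generalizing i first with
  | nil =>
    have hlen : nums.length ≤ i := by
      by_contra h
      push Not at h
      have := List.drop_eq_getElem_cons h
      rw [hdrop] at this
      exact List.cons_ne_nil _ _ this.symm
    unfold canLoopA
    simp [loopB]
    omega
  | cons x rest' ih =>
    have hi : i < nums.length := by
      by_contra h
      push Not at h
      rw [List.drop_eq_nil_of_le h] at hdrop
      exact List.cons_ne_nil _ _ hdrop.symm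
    have hget : nums.getD i 0 = x := by
      have h1 : (nums.drop i).head? = some x := by rw [hdrop]; rfl
      rw [List.head?_drop] at h1
      simp [List.getD, h1]
    have hdrop' : nums.drop (i + 1) = rest' := by
      have : nums.drop (i + 1) = (nums.drop i).tail := by
        rw [List.tail_drop]
      rw [this, hdrop]; rfl
    have hsecond :
        (PySem.List.pyRange ((i : Int) + 1) (nums.length : Int) 1).foldl
          (fun acc j => acc + PySem.List.pyGetD nums j 0) 0 = rest'.sum := by
      have hcast : ((i : Int) + 1) = ((i + 1 : Nat) : Int) := by push_cast; ring
      rw [hcast, PySem.List.foldl_pyRange_pyGetD' nums 0 (fun acc v => acc + v) 0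
        (Int.natCast_nonneg _)]
      simp [hdrop', List.sum_eq_foldl]
    unfold canLoopA
    rw [dif_pos ⟨hi, rfl⟩]
    simp only [PySem.List.pyGetD_natCast, hget, hsecond]
    by_cases hc : first + x = rest'.sum
    · rw [if_pos hc, canLoopA_found]
      simp only [loopB, List.sum_cons]
      rw [if_pos (by omega)]
    · rw [if_neg hc, ih (i + 1) (first + x) hdrop']
      simp only [loopB, List.sum_cons]
      rw [if_neg (by omega)]
      congr 1
      ring

-- ===== VERDICT (by name: the statement is the Claim_ definition above) =====
theorem can_balance_spec : Claim_equal_can_balance := by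
  intro nums _
  unfold Spec_can_balance can_balance can_balance_alt
  simpa using canLoopA_eq_loopB nums nums 0 0 (by simp)
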